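-- pv_equiv track=rewrite | github.com/ljdemers/ps-other-services | screening-workers/screening_workers/lib/blacklist.py | get_port_country_severity
-- ===== SOURCE A (Python) =====
-- def get_port_country_severity(blacklisted_ports,
--                               port_name=None,
--                               country_name=None) -> dict:
--     """
--          SCREEN-891:
--          When the Country is blacklisted, all Ports belonging to that
--          Country will also be blacklisted.
--     """
--     found_bl_port = {}
--     for bp in blacklisted_ports:
--         if bp['port'] is None:
--             if country_name == bp['country']:
--                 found_bl_port = bp
--         elif bp['country'] is None:
--             if port_name == bp['port']:
--                 found_bl_port = bp
--         else:
--             if port_name == bp['port'] and \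
--               country_name == bp['country']:
--                 found_bl_port = bp
--                 break
--
--     return found_bl_port
-- ===== SOURCE B (Python) =====
-- def get_port_country_severity(blacklisted_ports,
--                               port_name=None,
--                               country_name=None) -> dict:
--     # Pass 1: an exact (port, country) match always wins; return the first one
--     # (.get: a partial entry cannot be an exact match, so just skip it here).
--     for bp in blacklisted_ports:
--         p, c = bp.get('port'), bp.get('country')
--         if p is not None and c is not None and port_name == p and country_name == c:
--             return bp
--     # Pass 2: no exact match -> last partial match wins, i.e. the first one
--     # found scanning backwards.
--     for bp in reversed(blacklisted_ports):
--         if bp['port'] is None: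
--             if country_name == bp['country']:
--                 return bp
--         elif bp['country'] is None:
--             if port_name == bp['port']:
--                 return bp
--     return {}
-- ===== Notes on version B (the rewrite author's own statement) =====
-- stated objective: alternative
-- what changed: Replaces A's single interleaved loop (last-wins accumulator with an early break) by two separately-shaped passes: a forward scan returning the first exact port+country match, then a backwards scan returning the first (= last in order) partial match, defaulting to {}.
import Mathlib
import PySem

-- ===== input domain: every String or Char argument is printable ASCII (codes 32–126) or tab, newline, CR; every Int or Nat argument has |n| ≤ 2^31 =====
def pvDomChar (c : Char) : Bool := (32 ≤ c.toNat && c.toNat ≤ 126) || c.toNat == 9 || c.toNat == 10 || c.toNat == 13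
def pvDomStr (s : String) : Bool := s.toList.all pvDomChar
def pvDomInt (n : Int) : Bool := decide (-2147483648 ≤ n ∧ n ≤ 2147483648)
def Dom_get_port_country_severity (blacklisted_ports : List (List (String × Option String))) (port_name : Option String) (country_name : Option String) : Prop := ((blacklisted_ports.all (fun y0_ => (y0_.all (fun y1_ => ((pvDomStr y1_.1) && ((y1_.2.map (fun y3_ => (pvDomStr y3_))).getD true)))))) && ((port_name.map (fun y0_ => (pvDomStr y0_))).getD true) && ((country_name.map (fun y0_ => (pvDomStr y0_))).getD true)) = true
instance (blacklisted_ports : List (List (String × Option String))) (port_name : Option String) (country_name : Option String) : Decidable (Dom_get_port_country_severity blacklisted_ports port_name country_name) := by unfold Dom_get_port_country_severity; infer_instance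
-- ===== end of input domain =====

-- B replaces A's interleaved loop by two passes (exact-match forward scan, then a
-- backwards scan for the last partial match, with .get instead of []); objective: alternative.
-- ===== PORT A =====
-- A's single loop with last-wins accumulator and early break on an exact match.
def pvGoA (port_name country_name : Option String) :
    List (List (String × Option String)) → List (String × Option String) → List (String × Option String)
  | [], acc => acc
  | bp :: rest, acc =>
    match bp.lookup "port", bp.lookup "country" with
    | some none, some c =>
        pvGoA port_name country_name rest (if country_name = c then bp else acc)
    | some (some p), some none =>
        pvGoA port_name country_name rest (if port_name = some p then bp else acc)
    | some (some p), some (some c) =>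
        if port_name = some p ∧ country_name = some c then bp
        else pvGoA port_name country_name rest acc
    | _, _ => []  -- KeyError in Python: excluded by Pre_

def get_port_country_severity (blacklisted_ports : List (List (String × Option String))) (port_name : Option String) (country_name : Option String) : List (String × Option String) :=
  pvGoA port_name country_name blacklisted_ports []

-- ===== PORT B =====
-- pass 1: first exact match (bp.get('port') / bp.get('country') = (lookup …).join)
def pvExact? (port_name country_name : Option String) :
    List (List (String × Option String)) → Option (List (String × Option String))
  | [] => none
  | bp :: rest =>
    match (bp.lookup "port").join, (bp.lookup "country").join with
    | some p, some c =>
        if port_name = some p ∧ country_name = some c then some bp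
        else pvExact? port_name country_name rest
    | _, _ => pvExact? port_name country_name rest

-- pass 2: first partial match of the given list (B applies it to the reversed list);
-- this pass indexes like A does (bp['port'] / bp['country'])
def pvPartial? (port_name country_name : Option String) :
    List (List (String × Option String)) → Option (List (String × Option String))
  | [] => none
  | bp :: rest =>
    match bp.lookup "port", bp.lookup "country" with
    | some none, some c =>
        if country_name = c then some bp else pvPartial? port_name country_name rest
    | some (some p), some none =>
        if port_name = some p then some bp else pvPartial? port_name country_name rest
    | some (some _), some (some _) => pvPartial? port_name country_name rest
    | _, _ => pvPartial? port_name country_name rest  -- KeyError in Python: excluded by Pre_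

def get_port_country_severity_alt (blacklisted_ports : List (List (String × Option String))) (port_name : Option String) (country_name : Option String) : List (String × Option String) :=
  match pvExact? port_name country_name blacklisted_ports with
  | some bp => bp
  | none => (pvPartial? port_name country_name blacklisted_ports.reverse).getD []

-- ===== PRECONDITION & SPEC =====
-- an entry on which A's exact-match break fires
def pvExactEntry (port_name country_name : Option String) (bp : List (String × Option String)) : Bool :=
  match bp.lookup "port", bp.lookup "country" with
  | some (some p), some (some c) => port_name == some p && country_name == some c
  | _, _ => false

-- Pre_ holds exactly where Python A returns: every entry A actually reads — those before
-- the first exact-match entry, at which A breaks — has both the 'port' and 'country' keys;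
-- on an entry missing one of them A raises KeyError.
def Pre_get_port_country_severity (blacklisted_ports : List (List (String × Option String))) (port_name : Option String) (country_name : Option String) : Prop :=
  ∀ bp ∈ blacklisted_ports.takeWhile (fun bp => !(pvExactEntry port_name country_name bp)),
    (bp.lookup "port").isSome ∧ (bp.lookup "country").isSome
instance (blacklisted_ports : List (List (String × Option String))) (port_name : Option String) (country_name : Option String) : Decidable (Pre_get_port_country_severity blacklisted_ports port_name country_name) := by unfold Pre_get_port_country_severity; infer_instance

def pvWitness_get_port_country_severity : (List (List (String × Option String))) × Option String × Option String :=
  ([[("port", none), ("country", some "FR")], [("port", some "LE HAVRE"), ("country", some "FR")]], some "LE HAVRE", some "FR")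

def Spec_get_port_country_severity (blacklisted_ports : List (List (String × Option String))) (port_name : Option String) (country_name : Option String) (out : List (String × Option String)) : Prop := out = get_port_country_severity_alt blacklisted_ports port_name country_name
instance (blacklisted_ports : List (List (String × Option String))) (port_name : Option String) (country_name : Option String) (out : List (String × Option String)) : Decidable (Spec_get_port_country_severity blacklisted_ports port_name country_name out) := by unfold Spec_get_port_country_severity; infer_instance

-- ===== CLAIM (what is proved, stated in full; the proofs are below) =====
def Claim_equal_get_port_country_severity : Prop := ∀ (blacklisted_ports : List (List (String × Option String))) (port_name : Option String) (country_name : Option String), Dom_get_port_country_severity blacklisted_ports port_name country_name → Pre_get_port_country_severity blacklisted_ports port_name country_name → Spec_get_port_country_severity blacklisted_ports port_name country_name (get_port_country_severity blacklisted_ports port_name country_name)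

-- ===== LEMMAS AND PROOFS =====
-- pvPartial? distributes over append as a first-match search.
theorem pvPartial?_append (pn cn : Option String) (xs ys : List (List (String × Option String))) :
    pvPartial? pn cn (xs ++ ys) = (pvPartial? pn cn xs).or (pvPartial? pn cn ys) := by
  induction xs with
  | nil => simp [pvPartial?]
  | cons bp rest ih =>
    simp only [List.cons_append, pvPartial?]
    rcases h1 : bp.lookup "port" with _ | (_ | p) <;>
      rcases h2 : bp.lookup "country" with _ | (_ | c) <;>
      simp [ih] <;> split <;> simp [ih]

-- Main invariant: under Pre_'s prefix condition, A's loop with accumulator acc equals: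
-- first exact match, else first partial match of the reversed list, else acc.
theorem pvGoA_eq (pn cn : Option String) (l : List (List (String × Option String)))
    (acc : List (String × Option String))
    (h : ∀ bp ∈ l.takeWhile (fun bp => !(pvExactEntry pn cn bp)),
          (bp.lookup "port").isSome ∧ (bp.lookup "country").isSome) :
    pvGoA pn cn l acc =
      match pvExact? pn cn l with
      | some bp => bp
      | none => (pvPartial? pn cn l.reverse).getD acc := by
  induction l generalizing acc with
  | nil => simp [pvGoA, pvExact?, pvPartial?]
  | cons bp rest ih =>
    have hrev : (bp :: rest).reverse = rest.reverse ++ [bp] := by simp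
    by_cases he : pvExactEntry pn cn bp = true
    · -- A breaks here; B's first pass returns bp here too
      unfold pvExactEntry at he
      rcases h1 : bp.lookup "port" with _ | (_ | p) <;> rw [h1] at he <;>
        rcases h2 : bp.lookup "country" with _ | (_ | c) <;> rw [h2] at he <;>
        simp at he
      obtain ⟨hp, hc⟩ := he
      simp [pvGoA, pvExact?, h1, h2, hp, hc]
    · have htw : (bp :: rest).takeWhile (fun bp => !(pvExactEntry pn cn bp))
          = bp :: rest.takeWhile (fun bp => !(pvExactEntry pn cn bp)) := by
        simp [List.takeWhile_cons, he]
      rw [htw] at h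
      have hbp := h bp (List.mem_cons_self ..)
      have hrest := fun b hb => h b (List.mem_cons_of_mem _ hb)
      rcases h1 : bp.lookup "port" with _ | (_ | p)
      · simp [h1] at hbp
      · rcases h2 : bp.lookup "country" with _ | c
        · simp [h2] at hbp
        · -- bp['port'] is None
          simp only [pvGoA, pvExact?, h1, h2, Option.join, hrev, pvPartial?_append, ih _ hrest]
          cases hx : pvExact? pn cn rest with
          | some b => simp [hx]
          | none =>
            simp only [hx]
            cases hy : pvPartial? pn cn rest.reverse <;>
              simp [hy, pvPartial?, h1, h2, Option.join, Option.or] <;> split <;> simp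
      · rcases h2 : bp.lookup "country" with _ | (_ | c)
        · simp [h2] at hbp
        · -- bp['country'] is None, port is some p
          simp only [pvGoA, pvExact?, h1, h2, Option.join, hrev, pvPartial?_append, ih _ hrest]
          cases hx : pvExact? pn cn rest with
          | some b => simp [hx]
          | none =>
            simp only [hx]
            cases hy : pvPartial? pn cn rest.reverse <;>
              simp [hy, pvPartial?, h1, h2, Option.join, Option.or] <;> split <;> simp
        · -- both present but not an exact match (he)
          unfold pvExactEntry at he
          rw [h1, h2] at he
          simp only [Bool.not_eq_true, Bool.and_eq_false_iff] at he
          have hne : ¬ (pn = some p ∧ cn = some c) := by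
            rintro ⟨rfl, rfl⟩; simp at he
          simp only [pvGoA, pvExact?, h1, h2, Option.join, if_neg hne, hrev,
            pvPartial?_append, ih _ hrest]
          cases hx : pvExact? pn cn rest with
          | some b => simp [hne]
          | none =>
            simp only [hx]
            cases hy : pvPartial? pn cn rest.reverse <;>
              simp [pvPartial?, h1, h2, Option.join, Option.or, hne]

-- ===== VERDICT (by name: the statements are the Claim_ definitions above) =====
theorem get_port_country_severity_spec : Claim_equal_get_port_country_severity := by
  intro l pn cn _ hpre
  unfold Spec_get_port_country_severity get_port_country_severity get_port_country_severity_alt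
  rw [pvGoA_eq pn cn l [] hpre]
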